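-- pv_equiv track=rewrite | github.com/Pecximenes/UnBWorks | ED/Trabalho_ED_02.py | adiciona_carga
-- ===== SOURCE A (Python) =====
-- def adiciona_carga(lista_c, lista_w, lista_s):
--     for wookie in lista_w:
--         if lista_c != []:
--             wookie.append(lista_c.pop(0))
--
--         else:
--             return lista_w, lista_s
--
--     for carga in lista_c:
--         c = True
--         for wookie in lista_w:
--             if carga <= wookie[len(wookie) - 1]:
--                 wookie.append(carga)
--                 c = False
--                 break
--
--         if c:
--             lista_s.append(carga)
--
--     return lista_w, lista_s
-- ===== SOURCE B (Python) =====
-- def adiciona_carga(lista_c, lista_w, lista_s):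
--     # Pure re-implementation (no in-place mutation, unlike A): seed by slicing,
--     # then stream-filter the remaining cargas through the wookies one wookie at a time.
--     k = len(lista_w)
--     if len(lista_c) < k:
--         out_w = [w + [c] for w, c in zip(lista_w, lista_c)] + lista_w[len(lista_c):]
--         return out_w, lista_s
--     seeded = [w + [c] for w, c in zip(lista_w, lista_c)]
--     leftover = lista_c[k:]
--     result = []
--     for w in seeded:
--         top = w[-1]
--         taken = []
--         passed = []
--         for c in leftover:
--             if c <= top:
--                 taken.append(c)
--                 top = c
--             else:
--                 passed.append(c)
--         result.append(w + taken)
--         leftover = passed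
--     return result, lista_s + leftover
-- ===== Notes on version B (the rewrite author's own statement) =====
-- stated objective: faster
-- what changed: B seeds the wookies by zipping/slicing instead of repeated pop(0), and replaces A's per-carga scan over all wookies with a per-wookie single pass that splits the remaining carga stream into taken and passed-on cargas; B is also pure (no in-place mutation of the arguments).
import Mathlib
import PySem

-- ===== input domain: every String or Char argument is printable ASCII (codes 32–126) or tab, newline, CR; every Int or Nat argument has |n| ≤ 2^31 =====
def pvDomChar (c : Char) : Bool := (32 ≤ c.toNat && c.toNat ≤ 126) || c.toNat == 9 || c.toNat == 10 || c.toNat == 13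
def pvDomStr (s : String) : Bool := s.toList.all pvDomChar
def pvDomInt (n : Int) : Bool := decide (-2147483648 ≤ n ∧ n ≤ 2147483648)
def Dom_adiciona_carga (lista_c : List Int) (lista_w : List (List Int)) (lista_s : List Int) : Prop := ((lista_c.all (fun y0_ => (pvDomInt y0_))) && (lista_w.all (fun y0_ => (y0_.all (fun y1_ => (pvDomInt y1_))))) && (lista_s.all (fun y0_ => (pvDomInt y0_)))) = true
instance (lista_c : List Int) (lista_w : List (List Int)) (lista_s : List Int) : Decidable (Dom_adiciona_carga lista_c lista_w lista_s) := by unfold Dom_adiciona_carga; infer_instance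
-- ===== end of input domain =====

-- B replaces A's per-carga scan over all wookies by slicing for the seeding phase and a
-- per-wookie stream filter for the distribution phase (objective: alternative decomposition;
-- equivalence is about the RETURN value only — A mutates lista_c/lista_w/lista_s in place, B does not).

-- ===== PORT A =====
-- first loop of A: pop the front of lista_c onto each wookie; early return (none) when lista_c empties
def adicionaSeed : List (List Int) → List Int → List (List Int) × Option (List Int)
  | [], cs => ([], some cs)
  | w :: ws, [] => (w :: ws, none)
  | w :: ws, c :: cs =>
      let r := adicionaSeed ws cs
      ((w ++ [c]) :: r.1, r.2)

-- inner 'for wookie in lista_w … break' of A's second loop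
-- wookie[len(wookie)-1]: in A this index is always in range (every wookie was seeded), so getD 0 is never the none case
def tryPlace : List (List Int) → Int → Option (List (List Int))
  | [], _ => none
  | w :: ws, c =>
      if c ≤ (PySem.List.pyGet? w ((w.length : Int) - 1)).getD 0 then
        some ((w ++ [c]) :: ws)
      else
        (tryPlace ws c).map (fun t => w :: t)

def placeStep (st : List (List Int) × List Int) (c : Int) : List (List Int) × List Int :=
  match tryPlace st.1 c with
  | some ws => (ws, st.2)
  | none => (st.1, st.2 ++ [c])

def adiciona_carga (lista_c : List Int) (lista_w : List (List Int)) (lista_s : List Int) : List (List Int) × List Int :=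
  match adicionaSeed lista_w lista_c with
  | (ws, none) => (ws, lista_s)
  | (ws, some rest) => rest.foldl placeStep (ws, lista_s)

-- ===== PORT B =====
-- B's inner loop: split the carga stream into (taken by this wookie, passed on), top updating as it takes
def chainTake : Int → List Int → List Int × List Int
  | _, [] => ([], [])
  | top, c :: cs =>
      if c ≤ top then
        let r := chainTake c cs
        (c :: r.1, r.2)
      else
        let r := chainTake top cs
        (r.1, c :: r.2)

-- B's outer loop over the seeded wookies; w[-1]: seeded wookies are nonempty, so getD 0 is never the none case
def distribute : List (List Int) → List Int → List (List Int) × List Int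
  | [], cs => ([], cs)
  | w :: ws, cs =>
      let t := chainTake ((PySem.List.pyGet? w (-1)).getD 0) cs
      let r := distribute ws t.2
      ((w ++ t.1) :: r.1, r.2)

def adiciona_carga_alt (lista_c : List Int) (lista_w : List (List Int)) (lista_s : List Int) : List (List Int) × List Int :=
  if lista_c.length < lista_w.length then
    ((lista_w.zip lista_c).map (fun p => p.1 ++ [p.2]) ++ lista_w.drop lista_c.length, lista_s)
  else
    let seeded := (lista_w.zip lista_c).map (fun p => p.1 ++ [p.2])
    let r := distribute seeded (lista_c.drop lista_w.length)
    (r.1, lista_s ++ r.2)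

-- ===== PRECONDITION & SPEC =====
def Spec_adiciona_carga (lista_c : List Int) (lista_w : List (List Int)) (lista_s : List Int) (out : List (List Int) × List Int) : Prop := out = adiciona_carga_alt lista_c lista_w lista_s
instance (lista_c : List Int) (lista_w : List (List Int)) (lista_s : List Int) (out : List (List Int) × List Int) : Decidable (Spec_adiciona_carga lista_c lista_w lista_s out) := by unfold Spec_adiciona_carga; infer_instance

-- ===== CLAIM (what is proved, stated in full; the proofs are below) =====
def Claim_equal_adiciona_carga : Prop := ∀ (lista_c : List Int) (lista_w : List (List Int)) (lista_s : List Int), Dom_adiciona_carga lista_c lista_w lista_s → Spec_adiciona_carga lista_c lista_w lista_s (adiciona_carga lista_c lista_w lista_s)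

-- ===== LEMMAS AND PROOFS =====

-- the two "last element" expressions agree on nonempty lists
lemma lastD_eq (w : List Int) (hw : w ≠ []) :
    (PySem.List.pyGet? w ((w.length : Int) - 1)).getD 0 = (PySem.List.pyGet? w (-1)).getD 0 := by
  have h1 : PySem.List.pyGet? w (-1) = w.getLast? := PySem.List.pyGet?_neg_one w
  have hl : 0 < w.length := List.length_pos_iff.mpr hw
  have h2 : ((w.length : Int) - 1) = ((w.length - 1 : Nat) : Int) := by omega
  rw [h1, h2, PySem.List.pyGet?_natCast, List.getLast?_eq_getElem?]

lemma lastD_append (w : List Int) (c : Int) :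
    (PySem.List.pyGet? (w ++ [c]) (-1)).getD 0 = c := by
  rw [PySem.List.pyGet?_neg_one_append_singleton]; rfl

lemma placeStep_cons (w : List Int) (ws : List (List Int)) (s : List Int) (c : Int)
    (h : ¬ c ≤ (PySem.List.pyGet? w ((w.length : Int) - 1)).getD 0) :
    placeStep ((w :: ws), s) c = (w :: (placeStep (ws, s) c).1, (placeStep (ws, s) c).2) := by
  simp only [placeStep, tryPlace, if_neg h]
  cases tryPlace ws c <;> simp

lemma foldl_nil_ws : ∀ (rest s : List Int), rest.foldl placeStep (([] : List (List Int)), s) = ([], s ++ rest)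
  | [], s => by simp
  | c :: rest, s => by
      have : placeStep (([] : List (List Int)), s) c = ([], s ++ [c]) := by
        simp [placeStep, tryPlace]
      rw [List.foldl_cons, this, foldl_nil_ws rest (s ++ [c])]
      simp

lemma foldl_cons_ws : ∀ (rest : List Int) (w : List Int) (ws : List (List Int)) (s : List Int), w ≠ [] →
    rest.foldl placeStep ((w :: ws), s) =
      ((w ++ (chainTake ((PySem.List.pyGet? w (-1)).getD 0) rest).1) ::
        ((chainTake ((PySem.List.pyGet? w (-1)).getD 0) rest).2.foldl placeStep (ws, s)).1,
       ((chainTake ((PySem.List.pyGet? w (-1)).getD 0) rest).2.foldl placeStep (ws, s)).2)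
  | [], w, ws, s, hw => by simp [chainTake]
  | c :: rest, w, ws, s, hw => by
      by_cases h : c ≤ (PySem.List.pyGet? w (-1)).getD 0
      · have hA : c ≤ (PySem.List.pyGet? w ((w.length : Int) - 1)).getD 0 := by
          rwa [lastD_eq w hw]
        have hstep : placeStep ((w :: ws), s) c = ((w ++ [c]) :: ws, s) := by
          simp [placeStep, tryPlace, if_pos hA]
        rw [List.foldl_cons, hstep, foldl_cons_ws rest (w ++ [c]) ws s (by simp)]
        simp only [lastD_append, chainTake, if_pos h]
        simp
      · have hA : ¬ c ≤ (PySem.List.pyGet? w ((w.length : Int) - 1)).getD 0 := by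
          rwa [lastD_eq w hw]
        rw [List.foldl_cons, placeStep_cons w ws s c hA,
            foldl_cons_ws rest w ((placeStep (ws, s) c).1) ((placeStep (ws, s) c).2) hw]
        simp only [chainTake, if_neg h, List.foldl_cons]
  termination_by rest => rest.length

lemma foldl_eq_distribute : ∀ (ws : List (List Int)), (∀ w ∈ ws, w ≠ []) →
    ∀ (rest s : List Int),
      rest.foldl placeStep (ws, s) = ((distribute ws rest).1, s ++ (distribute ws rest).2)
  | [], _, rest, s => by simpa [distribute] using foldl_nil_ws rest s
  | w :: ws, h, rest, s => by
      have hw : w ≠ [] := h w (by simp)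
      rw [foldl_cons_ws rest w ws s hw,
          foldl_eq_distribute ws (fun x hx => h x (by simp [hx])) _ s]
      simp [distribute]

lemma seed_short : ∀ (ws : List (List Int)) (cs : List Int), cs.length < ws.length →
    adicionaSeed ws cs = ((ws.zip cs).map (fun p => p.1 ++ [p.2]) ++ ws.drop cs.length, none)
  | [], cs, h => by simp at h
  | w :: ws, [], _ => by simp [adicionaSeed]
  | w :: ws, c :: cs, h => by
      simp only [adicionaSeed, seed_short ws cs (by simpa using h)]
      simp

lemma seed_long : ∀ (ws : List (List Int)) (cs : List Int), ws.length ≤ cs.length →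
    adicionaSeed ws cs = ((ws.zip cs).map (fun p => p.1 ++ [p.2]), some (cs.drop ws.length))
  | [], cs, _ => by simp [adicionaSeed]
  | w :: ws, [], h => by simp at h
  | w :: ws, c :: cs, h => by
      simp only [adicionaSeed, seed_long ws cs (by simpa using h)]
      simp

-- ===== VERDICT (by name: the statement is the Claim_ definition above) =====
theorem adiciona_carga_spec : Claim_equal_adiciona_carga := by
  intro lista_c lista_w lista_s _
  unfold Spec_adiciona_carga adiciona_carga adiciona_carga_alt
  by_cases h : lista_c.length < lista_w.length
  · rw [seed_short lista_w lista_c h, if_pos h]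
  · rw [seed_long lista_w lista_c (by omega), if_neg h]
    have hne : ∀ w ∈ (lista_w.zip lista_c).map (fun p => p.1 ++ [p.2]), w ≠ [] := by
      intro w hw
      simp only [List.mem_map] at hw
      obtain ⟨p, _, rfl⟩ := hw
      simp
    simp only [foldl_eq_distribute _ hne]
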